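-- pv_equiv track=rewrite | github.com/kmmansukhani/MyProjectEulerSolutions | p010.py | getKthDigit
-- ===== SOURCE A (Python) =====
-- def getKthDigit(n,k):
--     count = 0
--     digit = n % 10
--     while count <= k:
--         digit = n % 10
--         n //= 10
--         count += 1
--     return digit
-- ===== SOURCE B (Python) =====
-- def getKthDigit(n, k):
--     # Closed form: no loop 2014 shift away the low k digits, then take the units digit.
--     return n // 10 ** k % 10
-- ===== Notes on version B (the rewrite author's own statement) =====
-- stated objective: simpler
-- what changed: Replaces A's digit-peeling loop (k+1 iterations of % and //) with the single closed-form expression n // 10**k % 10.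
-- outside the precondition, e.g. on getKthDigit(123, -1): A returns 3, B returns 9.0
import Mathlib
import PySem

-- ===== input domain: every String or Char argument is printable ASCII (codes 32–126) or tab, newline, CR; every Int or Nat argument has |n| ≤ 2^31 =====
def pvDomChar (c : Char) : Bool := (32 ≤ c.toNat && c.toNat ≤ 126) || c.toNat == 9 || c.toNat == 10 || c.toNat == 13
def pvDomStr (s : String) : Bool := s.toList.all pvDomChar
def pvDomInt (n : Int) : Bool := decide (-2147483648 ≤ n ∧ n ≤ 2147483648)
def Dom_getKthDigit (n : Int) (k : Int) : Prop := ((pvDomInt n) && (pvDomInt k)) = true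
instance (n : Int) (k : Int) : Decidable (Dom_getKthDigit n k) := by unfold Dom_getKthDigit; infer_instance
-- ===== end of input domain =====

-- B replaces A's digit-peeling loop with the closed form n // 10**k % 10 (one expression, no loop state).


-- ===== PORT A =====
-- the while loop: state (n, count, digit); runs while count ≤ k
def getKthDigitLoop (n : Int) (count : Int) (k : Int) (digit : Int) : Int :=
  if count ≤ k then
    getKthDigitLoop (PySem.Int.floordiv n 10) (count + 1) k (PySem.Int.mod n 10)
  else
    digit
termination_by (k + 1 - count).toNat
decreasing_by omega

def getKthDigit (n : Int) (k : Int) : Int :=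
  getKthDigitLoop n 0 k (PySem.Int.mod n 10)

-- ===== PORT B =====
def getKthDigit_alt (n : Int) (k : Int) : Int :=
  PySem.Int.mod (PySem.Int.floordiv n (10 ^ k.toNat)) 10

-- ===== PRECONDITION & SPEC =====
-- Pre_ restricts k to the natural domain of a digit index: for k < 0 Python's 10**k is a
-- float, so B returns a float (not an int) while A happens to return n % 10.
def Pre_getKthDigit (n : Int) (k : Int) : Prop := 0 ≤ k
instance (n : Int) (k : Int) : Decidable (Pre_getKthDigit n k) := by unfold Pre_getKthDigit; infer_instance
def pvWitness_getKthDigit : Int × Int := (9431, 2)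

def Spec_getKthDigit (n : Int) (k : Int) (out : Int) : Prop := out = getKthDigit_alt n k
instance (n : Int) (k : Int) (out : Int) : Decidable (Spec_getKthDigit n k out) := by unfold Spec_getKthDigit; infer_instance

-- ===== CLAIM (what is proved, stated in full; the proofs are below) =====
def Claim_equal_getKthDigit : Prop := ∀ (n : Int) (k : Int), Dom_getKthDigit n k → Pre_getKthDigit n k → Spec_getKthDigit n k (getKthDigit n k)

-- ===== LEMMAS AND PROOFS =====

-- A's loop, entered with count = c ≤ k, returns the units digit of n shifted right by (k - c + 1) - 1 places.
theorem getKthDigitLoop_eq (m : Nat) : ∀ (n c k d : Int), c ≤ k → (k - c).toNat = m →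
    getKthDigitLoop n c k d = PySem.Int.mod (PySem.Int.floordiv n (10 ^ m)) 10 := by
  induction m with
  | zero =>
    intro n c k d hck hm
    have hck' : c = k := by omega
    rw [getKthDigitLoop, if_pos hck, getKthDigitLoop, if_neg (by omega)]
    simp [PySem.Int.floordiv]
  | succ m ih =>
    intro n c k d hck hm
    rw [getKthDigitLoop, if_pos hck,
        ih (PySem.Int.floordiv n 10) (c + 1) k (PySem.Int.mod n 10) (by omega) (by omega)]
    have h10 : (0:Int) < 10 := by norm_num
    have hpow : (0:Int) < 10 ^ m := by positivity
    rw [PySem.Int.floordiv_eq_ediv_of_pos h10, PySem.Int.floordiv_eq_ediv_of_pos hpow,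
        PySem.Int.floordiv_eq_ediv_of_pos (by positivity),
        Int.ediv_ediv_of_nonneg (by norm_num), pow_succ]
    ring_nf

-- ===== VERDICT (by name: the statement is the Claim_ definition above) =====
theorem getKthDigit_spec : Claim_equal_getKthDigit := by
  intro n k _ hk
  unfold Spec_getKthDigit getKthDigit getKthDigit_alt
  exact getKthDigitLoop_eq k.toNat n 0 k (PySem.Int.mod n 10) hk (by omega)
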